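-- pv_equiv track=rewrite | github.com/ym1522/Algorithm-study | 김수빈/baekjoon/10997_bj.py | solution
-- ===== SOURCE A (Python) =====
-- def solution(x):
--     if x == 1: return ['*']
--     n = 4 * (x - 1) + 1
--     prev = solution(x - 1)
--
--     rows = []
--     rows += ['*' * n, '*']
--
--     if len(prev) == 1:
--         prev = prev * 3
--
--     star_num = n - 2 - len(prev[0])
--     rows += ['* ' + prev[0] + '*' * star_num]
--     for line in prev[1:]:
--         space_num = n - 3 - len(line)
--         rows += ['* ' + line + ' ' * space_num + '*']
--
--     rows += ['*' + ' ' * (n - 2) + '*']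
--     rows += ['*' * n]
--     return rows
-- ===== SOURCE B (Python) =====
-- def solution(x):
--     rows = ['*']
--     for k in range(2, x + 1):
--         n = 4 * (k - 1) + 1
--         prev = rows * 3 if len(rows) == 1 else rows
--         top = ['*' * n, '*', '* ' + prev[0] + '*' * (n - 2 - len(prev[0]))]
--         mid = ['* ' + line + ' ' * (n - 3 - len(line)) + '*' for line in prev[1:]]
--         rows = top + mid + ['*' + ' ' * (n - 2) + '*', '*' * n]
--     return rows
-- ===== Notes on version B (the rewrite author's own statement) =====
-- stated objective: alternative
-- what changed: Replaces A's top-down recursion with an explicit bottom-up loop over layer sizes, building each layer's middle lines with a comprehension and list concatenation instead of repeated appends inside a recursive call.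
import Mathlib
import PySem

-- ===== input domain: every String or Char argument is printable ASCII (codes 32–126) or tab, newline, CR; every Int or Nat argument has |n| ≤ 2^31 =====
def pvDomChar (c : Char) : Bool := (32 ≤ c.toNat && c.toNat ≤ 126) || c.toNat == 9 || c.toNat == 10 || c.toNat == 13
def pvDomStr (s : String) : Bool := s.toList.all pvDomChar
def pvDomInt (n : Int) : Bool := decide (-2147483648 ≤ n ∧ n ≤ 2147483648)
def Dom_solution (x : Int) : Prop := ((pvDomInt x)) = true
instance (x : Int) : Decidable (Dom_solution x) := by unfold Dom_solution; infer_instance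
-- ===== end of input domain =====

-- B replaces A's top-down recursion by a bottom-up loop over layer sizes (alternative decomposition, same cost).

-- ===== PORT A =====
-- 'c' * m  for a character c (Python string repetition; m ≤ 0 gives "")
def pyRepChar (c : Char) (m : Int) : String := String.mk (List.replicate m.toNat c)

def solution (x : Int) : List String :=
  -- Python tests 'x == 1'; for x < 1 the Python recurses forever (excluded by Pre_),
  -- the '≤' guard only makes the port total there.
  if h : x ≤ 1 then ["*"]
  else
    let n : Int := 4 * (x - 1) + 1
    let prev := solution (x - 1)
    let rows : List String := [pyRepChar '*' n, "*"]
    -- if len(prev) == 1: prev = prev * 3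
    let prev := if prev.length == 1 then PySem.List.pyRepeat prev 3 else prev
    -- prev[0]: prev is never empty here, so the "" default is never used
    let prev0 := PySem.List.pyGetD prev 0 ""
    let starNum : Int := n - 2 - PySem.Str.len prev0
    let rows := rows ++ ["* " ++ prev0 ++ pyRepChar '*' starNum]
    -- for line in prev[1:]: rows += [...]
    let rows := (prev.drop 1).foldl
      (fun acc line => acc ++ ["* " ++ line ++ pyRepChar ' ' (n - 3 - PySem.Str.len line) ++ "*"]) rows
    let rows := rows ++ ["*" ++ pyRepChar ' ' (n - 2) ++ "*"]
    rows ++ [pyRepChar '*' n]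
termination_by x.toNat
decreasing_by omega

-- ===== PORT B =====
-- one layer step of Source B's loop body
def nextLayer (k : Int) (rows : List String) : List String :=
  let n : Int := 4 * (k - 1) + 1
  let prev := if rows.length == 1 then PySem.List.pyRepeat rows 3 else rows
  let prev0 := PySem.List.pyGetD prev 0 ""
  let top : List String := [pyRepChar '*' n, "*", "* " ++ prev0 ++ pyRepChar '*' (n - 2 - PySem.Str.len prev0)]
  let mid := (prev.drop 1).map (fun line => "* " ++ line ++ pyRepChar ' ' (n - 3 - PySem.Str.len line) ++ "*")
  top ++ mid ++ ["*" ++ pyRepChar ' ' (n - 2) ++ "*", pyRepChar '*' n]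

def solution_alt (x : Int) : List String :=
  (PySem.List.pyRange 2 (x + 1) 1).foldl (fun rows k => nextLayer k rows) ["*"]

-- ===== PRECONDITION & SPEC =====
-- Pre_ excludes x < 1, where Python's A recurses without a base case and raises RecursionError.
def Pre_solution (x : Int) : Prop := 1 ≤ x
instance (x : Int) : Decidable (Pre_solution x) := by unfold Pre_solution; infer_instance
def pvWitness_solution : Int := 3

def Spec_solution (x : Int) (out : List String) : Prop := out = solution_alt x
instance (x : Int) (out : List String) : Decidable (Spec_solution x out) := by unfold Spec_solution; infer_instance

-- ===== CLAIM (what is proved, stated in full; the proofs are below) =====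
def Claim_equal_solution : Prop := ∀ (x : Int), Dom_solution x → Pre_solution x → Spec_solution x (solution x)

-- ===== LEMMAS AND PROOFS =====

-- A's recursive step is B's layer step applied to the previous picture.
lemma solution_step (x : Int) (h : 2 ≤ x) :
    solution x = nextLayer x (solution (x - 1)) := by
  rw [solution]
  rw [dif_neg (by omega : ¬ x ≤ 1)]
  simp only [nextLayer, PySem.List.foldl_append_singleton_eq_map]
  simp [List.append_assoc]

lemma alt_eq_solution (x : Int) (h : 1 ≤ x) : solution_alt x = solution x := by
  induction x, h using Int.le_induction with
  | base =>
      rw [solution]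
      simp [solution_alt, PySem.List.pyRange]
  | succ y hy ih =>
      have hsplit : PySem.List.pyRange 2 (y + 1 + 1) 1
          = PySem.List.pyRange 2 (y + 1) 1 ++ [y + 1] := by
        simpa using PySem.List.pyRange_one_succ_right (a := 2) (b := y + 1) (by omega)
      rw [solution_alt, hsplit, List.foldl_append]
      have : (PySem.List.pyRange 2 (y + 1) 1).foldl (fun rows k => nextLayer k rows) ["*"]
          = solution_alt y := rfl
      rw [List.foldl_cons, List.foldl_nil, this, ih, solution_step (y + 1) (by omega)]
      simp

-- ===== VERDICT (by name: the statement is the Claim_ definition above) =====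
theorem solution_spec : Claim_equal_solution := by
  intro x _ hpre
  unfold Spec_solution
  exact (alt_eq_solution x hpre).symm
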